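-- pv_equiv track=rewrite | github.com/SDragon42/AdventOfCode | 2019/Python/src/day04.py | rule_only_two_adjacent_digits_are_same
-- ===== SOURCE A (Python) =====
-- from typing import Callable, List, Tuple
--
-- def rule_only_two_adjacent_digits_are_same(digits:List[int]) -> bool:
--     indexes = range(1, len(digits))
--     repeatCount = 0
--     last = digits[0]
--     for i in indexes:
--         current = digits[i]
--
--         if current == last:
--             repeatCount += 1
--             continue
--
--         if repeatCount == 1:
--             break
--
--         repeatCount = 0
--         last = current
--
--     result = repeatCount == 1
--     return result
-- ===== SOURCE B (Python) =====
-- def rule_only_two_adjacent_digits_are_same(digits):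
--     # run-length decomposition: collect the length of every maximal run, then test membership
--     runs = []
--     run = 1
--     for prev, cur in zip(digits, digits[1:]):
--         if cur == prev:
--             run += 1
--         else:
--             runs.append(run)
--             run = 1
--     runs.append(run)
--     return 2 in runs
-- ===== Notes on version B (the rewrite author's own statement) =====
-- stated objective: simpler
-- what changed: Replaces A's stateful index loop with early break and repeat-counter by a single zip pass that collects all maximal run lengths and then tests whether any equals 2.
import Mathlib
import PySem

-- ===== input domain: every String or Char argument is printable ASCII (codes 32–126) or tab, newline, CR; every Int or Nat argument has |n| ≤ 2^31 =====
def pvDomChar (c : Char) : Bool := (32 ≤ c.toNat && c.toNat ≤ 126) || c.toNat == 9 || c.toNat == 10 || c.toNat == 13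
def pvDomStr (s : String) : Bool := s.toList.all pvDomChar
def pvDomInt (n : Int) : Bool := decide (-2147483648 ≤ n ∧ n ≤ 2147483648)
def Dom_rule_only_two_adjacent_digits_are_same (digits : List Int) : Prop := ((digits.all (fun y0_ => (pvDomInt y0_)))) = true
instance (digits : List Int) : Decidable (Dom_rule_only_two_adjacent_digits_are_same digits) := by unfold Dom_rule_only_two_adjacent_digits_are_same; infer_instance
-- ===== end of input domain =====

-- B replaces A's index loop with repeat-counter and early break by one zip pass that
-- collects all maximal run lengths and tests membership of 2 (objective: simpler).

-- ===== PORT A =====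
-- the for-loop over `indexes` with its `break`: recursion over the index list,
-- returning repeatCount early in the break branch
def pvLoopA (digits : List Int) : List Int → Int → Int → Int
  | [], repeatCount, _ => repeatCount
  | i :: is, repeatCount, last =>
    let current := PySem.List.pyGetD digits i 0   -- i ∈ range(1, len): always in range
    if current == last then pvLoopA digits is (repeatCount + 1) last
    else if repeatCount == 1 then repeatCount     -- break
    else pvLoopA digits is 0 current

def rule_only_two_adjacent_digits_are_same (digits : List Int) : Bool :=
  let indexes := PySem.List.pyRange 1 (digits.length : Int) 1
  match PySem.List.pyGet? digits 0 with
  | none => false        -- Python raises IndexError here; excluded by Pre_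
  | some last => pvLoopA digits indexes 0 last == 1

-- ===== PORT B =====
def rule_only_two_adjacent_digits_are_same_alt (digits : List Int) : Bool :=
  let st := (List.zip digits (PySem.List.slice digits (some 1) none)).foldl
      (fun (st : List Int × Int) pc =>
        if pc.2 == pc.1 then (st.1, st.2 + 1) else (st.1 ++ [st.2], 1))
      ([], 1)
  (st.1 ++ [st.2]).contains 2

-- ===== PRECONDITION & SPEC =====
-- A raises IndexError (digits[0]) on the empty list; Pre_ excludes exactly that input.
def Pre_rule_only_two_adjacent_digits_are_same (digits : List Int) : Prop := digits ≠ []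
instance (digits : List Int) : Decidable (Pre_rule_only_two_adjacent_digits_are_same digits) := by unfold Pre_rule_only_two_adjacent_digits_are_same; infer_instance
def pvWitness_rule_only_two_adjacent_digits_are_same : List Int := [1, 2, 2, 3]

def Spec_rule_only_two_adjacent_digits_are_same (digits : List Int) (out : Bool) : Prop := out = rule_only_two_adjacent_digits_are_same_alt digits
instance (digits : List Int) (out : Bool) : Decidable (Spec_rule_only_two_adjacent_digits_are_same digits out) := by unfold Spec_rule_only_two_adjacent_digits_are_same; infer_instance

-- ===== CLAIM (what is proved, stated in full; the proofs are below) =====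
def Claim_equal_rule_only_two_adjacent_digits_are_same : Prop := ∀ (digits : List Int), Dom_rule_only_two_adjacent_digits_are_same digits → Pre_rule_only_two_adjacent_digits_are_same digits → Spec_rule_only_two_adjacent_digits_are_same digits (rule_only_two_adjacent_digits_are_same digits)

-- ===== LEMMAS AND PROOFS =====

-- direct recursion on the suffix equivalent to A's index loop
def pvLoopRec : List Int → Int → Int → Int
  | [], rc, _ => rc
  | c :: cs, rc, last =>
    if c == last then pvLoopRec cs (rc + 1) last
    else if rc == 1 then rc
    else pvLoopRec cs 0 c

-- run lengths of a nonempty list, recursively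
def pvRuns : Int → Int → List Int → List Int
  | _, run, [] => [run]
  | prev, run, c :: cs => if c == prev then pvRuns c (run + 1) cs else run :: pvRuns c 1 cs

theorem pvLoopA_eq (digits : List Int) :
    ∀ (k : Nat) (i rc last : Int), 0 ≤ i → ((digits.length : Int) - i).toNat = k →
      pvLoopA digits (PySem.List.pyRange i (digits.length : Int) 1) rc last
        = pvLoopRec (digits.drop i.toNat) rc last := by
  intro k
  induction k with
  | zero =>
    intro i rc last hi hk
    rw [PySem.List.pyRange_one_eq_nil (by omega)]
    rw [List.drop_eq_nil_of_le (by omega)]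
    rfl
  | succ n ih =>
    intro i rc last hi hk
    have hlt : i < (digits.length : Int) := by omega
    have hnat : i.toNat < digits.length := by omega
    rw [PySem.List.pyRange_one_cons hlt]
    rw [List.drop_eq_getElem_cons hnat]
    simp only [pvLoopA, pvLoopRec]
    rw [PySem.List.pyGetD_eq_getElem digits 0 hi hlt]
    have hdrop : digits.drop (i.toNat + 1) = digits.drop (i + 1).toNat := by
      congr 1; omega
    split_ifs with h1 h2
    · rw [ih (i + 1) (rc + 1) last (by omega) (by omega), hdrop]
    · rfl
    · rw [ih (i + 1) 0 digits[i.toNat] (by omega) (by omega), hdrop]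

theorem pvFoldB_eq :
    ∀ (rest : List Int) (prev : Int) (acc : List Int) (run : Int),
      ((List.zip (prev :: rest) rest).foldl
          (fun (st : List Int × Int) pc =>
            if pc.2 == pc.1 then (st.1, st.2 + 1) else (st.1 ++ [st.2], 1))
          (acc, run)).1
        ++ [((List.zip (prev :: rest) rest).foldl
          (fun (st : List Int × Int) pc =>
            if pc.2 == pc.1 then (st.1, st.2 + 1) else (st.1 ++ [st.2], 1))
          (acc, run)).2] = acc ++ pvRuns prev run rest := by
  intro rest
  induction rest with
  | nil => intro prev acc run; simp [pvRuns]
  | cons c cs ih =>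
    intro prev acc run
    simp only [List.zip_cons_cons, List.foldl_cons, pvRuns]
    by_cases h : c = prev
    · rw [if_pos (by simp [h] : (c == prev) = true), if_pos (by simp [h] : (c == prev) = true)]
      exact ih c acc (run + 1)
    · rw [if_neg (by simp [h] : ¬ (c == prev) = true), if_neg (by simp [h] : ¬ (c == prev) = true)]
      rw [ih c (acc ++ [run]) 1, List.append_assoc]
      rfl

theorem pvLoop_eq_runs :
    ∀ (rest : List Int) (last rc : Int), 0 ≤ rc →
      (pvLoopRec rest rc last == 1) = (pvRuns last (rc + 1) rest).contains 2 := by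
  intro rest
  induction rest with
  | nil =>
    intro last rc _
    simp only [pvLoopRec, pvRuns, List.contains_cons, List.contains_nil, Bool.or_false]
    by_cases h : rc = 1
    · simp [h]
    · simp [h]
      omega
  | cons c cs ih =>
    intro last rc hrc
    simp only [pvLoopRec, pvRuns]
    by_cases hc : c = last
    · rw [if_pos (by simp [hc] : (c == last) = true), if_pos (by simp [hc] : (c == last) = true)]
      subst hc
      exact ih c (rc + 1) (by omega)
    · rw [if_neg (by simp [hc] : ¬ (c == last) = true), if_neg (by simp [hc] : ¬ (c == last) = true)]
      by_cases h1 : rc = 1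
      · subst h1
        simp
      · rw [if_neg (by simp [h1] : ¬ ((rc : Int) == 1) = true)]
        rw [List.contains_cons]
        have h2 : ((2 : Int) == rc + 1) = false := by
          simp only [beq_eq_false_iff_ne, ne_eq]; omega
        rw [h2, Bool.false_or]
        simpa using ih c 0 le_rfl

-- ===== VERDICT (by name: the statement is the Claim_ definition above) =====
theorem rule_only_two_adjacent_digits_are_same_spec : Claim_equal_rule_only_two_adjacent_digits_are_same := by
  intro digits _ hpre
  unfold Spec_rule_only_two_adjacent_digits_are_same
  match digits with
  | [] => exact absurd rfl hpre
  | d :: rest =>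
    have hget : PySem.List.pyGet? (d :: rest) 0 = some d := by
      simp [PySem.List.pyGet?, PySem.List.pyIdx?]
    unfold rule_only_two_adjacent_digits_are_same rule_only_two_adjacent_digits_are_same_alt
    rw [PySem.List.slice_from_one]
    rw [hget]
    dsimp only
    simp only [List.tail_cons]
    rw [pvLoopA_eq (d :: rest) (((((d :: rest).length : Int)) - 1).toNat) 1 0 d (by omega) rfl]
    rw [pvFoldB_eq rest d [] 1]
    simp only [Int.toNat_one, List.drop_succ_cons, List.drop_zero, List.nil_append]
    simpa using pvLoop_eq_runs rest d 0 le_rfl
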